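-- pv_equiv track=rewrite | github.com/hypertrial/honestroles | src/honestroles/publish/neondb.py | _build_facets
-- ===== SOURCE A (Python) =====
-- from collections import Counter
-- from typing import Any, Iterator, Protocol
--
-- def _build_facets(rows: list[dict[str, Any]]) -> list[tuple[str, str, int]]:
--     counters: dict[str, Counter[str]] = {
--         "source": Counter(),
--         "location": Counter(),
--         "work_mode": Counter(),
--         "seniority": Counter(),
--         "employment_type": Counter(),
--     }
--     for row in rows:
--         _add_facet_value(counters["source"], row.get("source"))
--         _add_facet_value(counters["location"], row.get("location"))
--         _add_facet_value(counters["work_mode"], row.get("work_mode"))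
--         _add_facet_value(counters["seniority"], row.get("seniority"))
--         _add_facet_value(counters["employment_type"], row.get("employment_type"))
--
--     out: list[tuple[str, str, int]] = []
--     for facet_name in sorted(counters):
--         counter = counters[facet_name]
--         for facet_value, count in sorted(counter.items()):
--             out.append((facet_name, facet_value, int(count)))
--     return out
--
-- def _add_facet_value(counter: Counter[str], value: Any) -> None:
--     text = _coerce_text(value)
--     if text:
--         counter[text.lower()] += 1
--
-- def _coerce_text(value: Any) -> str | None:
--     if value is None:
--         return None
--     text = str(value).strip()
--     return text if text else None
-- ===== SOURCE B (Python) =====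
-- from collections import Counter
--
--
-- def _build_facets(rows):
--     field_names = ("source", "location", "work_mode", "seniority", "employment_type")
--     out = []
--     for name in sorted(field_names):
--         counter = Counter()
--         for row in rows:
--             value = row.get(name)
--             if value is None:
--                 continue
--             text = str(value).strip()
--             if text:
--                 counter[text.lower()] += 1
--         for value, count in sorted(counter.items()):
--             out.append((name, value, int(count)))
--     return out
-- ===== Notes on version B (the rewrite author's own statement) =====
-- stated objective: alternative
-- what changed: Replaced A's single row-major pass that feeds a dict of five counters with a field-major decomposition: for each facet name in sorted order, an independent full scan of the rows builds a fresh Counter, whose sorted items are emitted directly; the counters dict and the key-sorting over it disappear.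
import Mathlib
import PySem

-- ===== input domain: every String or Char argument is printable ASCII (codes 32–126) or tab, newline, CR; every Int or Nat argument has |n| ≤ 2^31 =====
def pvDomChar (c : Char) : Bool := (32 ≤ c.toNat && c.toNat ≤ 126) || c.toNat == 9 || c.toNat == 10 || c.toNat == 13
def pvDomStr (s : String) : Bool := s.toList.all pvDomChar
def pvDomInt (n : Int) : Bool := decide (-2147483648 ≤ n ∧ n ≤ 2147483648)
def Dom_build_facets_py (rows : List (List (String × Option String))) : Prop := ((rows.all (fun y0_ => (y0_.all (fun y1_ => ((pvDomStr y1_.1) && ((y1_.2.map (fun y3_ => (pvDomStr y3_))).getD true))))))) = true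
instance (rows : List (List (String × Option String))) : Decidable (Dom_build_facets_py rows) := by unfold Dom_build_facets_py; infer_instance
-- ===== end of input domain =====

-- B re-groups the work field-major: one independent Counter pass over the rows per facet
-- field (five passes, fields taken in sorted order) instead of A's single row-major pass
-- feeding five counters; objective: alternative decomposition, same results.


-- ===== PORT A =====

-- _coerce_text: None stays None; otherwise strip, and a stripped-empty string becomes None
def coerce_text (value : Option String) : Option String :=
  match value with
  | none => none
  | some v =>
    let text := PySem.Str.strip v
    if text = "" then none else some text

-- _add_facet_value: counter[text.lower()] += 1 when the coerced text is truthy (non-None)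
def add_facet_value (counter : PySem.Dict String Int) (value : Option String) : PySem.Dict String Int :=
  match coerce_text value with
  | none => counter
  | some text => counter.modify (PySem.Str.lower text) 0 (· + 1)

-- single row-major pass: the dict of five counters, each updated in place per row;
-- counters[facet_name] is a getD with an empty-dict default (the key always exists).
def build_facets_py (rows : List (List (String × Option String))) : List (String × String × Int) :=
  let counters : PySem.Dict String (PySem.Dict String Int) :=
    PySem.Dict.mk [("source", PySem.Dict.mk []), ("location", PySem.Dict.mk []),
      ("work_mode", PySem.Dict.mk []), ("seniority", PySem.Dict.mk []),
      ("employment_type", PySem.Dict.mk [])]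
  let counters := rows.foldl (fun counters row =>
    let counters := counters.insert "source"
      (add_facet_value (counters.getD "source" (PySem.Dict.mk [])) ((PySem.Dict.mk row).getD "source" none))
    let counters := counters.insert "location"
      (add_facet_value (counters.getD "location" (PySem.Dict.mk [])) ((PySem.Dict.mk row).getD "location" none))
    let counters := counters.insert "work_mode"
      (add_facet_value (counters.getD "work_mode" (PySem.Dict.mk [])) ((PySem.Dict.mk row).getD "work_mode" none))
    let counters := counters.insert "seniority"
      (add_facet_value (counters.getD "seniority" (PySem.Dict.mk [])) ((PySem.Dict.mk row).getD "seniority" none))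
    let counters := counters.insert "employment_type"
      (add_facet_value (counters.getD "employment_type" (PySem.Dict.mk [])) ((PySem.Dict.mk row).getD "employment_type" none))
    counters) counters
  (PySem.List.sorted counters.keys (fun k => k) false).foldl (fun out facet_name =>
    let counter := counters.getD facet_name (PySem.Dict.mk [])
    (PySem.List.sorted2 counter.items (fun p => p.1) (fun p => p.2) false).foldl
      (fun out p => out ++ [(facet_name, p.1, p.2)]) out) []

-- ===== PORT B =====

-- field-major: for each facet name in sorted order, one fresh Counter pass over all rows
def build_facets_py_alt (rows : List (List (String × Option String))) : List (String × String × Int) :=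
  let field_names := ["source", "location", "work_mode", "seniority", "employment_type"]
  (PySem.List.sorted field_names (fun x => x) false).foldl (fun out name =>
    let counter := rows.foldl (fun counter row =>
      match (PySem.Dict.mk row).getD name none with
      | none => counter
      | some value =>
        let text := PySem.Str.strip value
        if text = "" then counter
        else counter.modify (PySem.Str.lower text) 0 (· + 1)) ((PySem.Dict.mk []) : PySem.Dict String Int)
    (PySem.List.sorted2 counter.items (fun p => p.1) (fun p => p.2) false).foldl
      (fun out p => out ++ [(name, p.1, p.2)]) out) []

-- ===== PRECONDITION & SPEC =====
def Spec_build_facets_py (rows : List (List (String × Option String))) (out : List (String × String × Int)) : Prop := out = build_facets_py_alt rows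
instance (rows : List (List (String × Option String))) (out : List (String × String × Int)) : Decidable (Spec_build_facets_py rows out) := by unfold Spec_build_facets_py; infer_instance

-- ===== CLAIM (what is proved, stated in full; the proofs are below) =====
def Claim_equal_build_facets_py : Prop := ∀ (rows : List (List (String × Option String))), Dom_build_facets_py rows → Spec_build_facets_py rows (build_facets_py rows)

-- ===== LEMMAS AND PROOFS =====

-- A's row-major fold over the five-counter dict is five independent per-field folds
theorem A_fold (rows : List (List (String × Option String)))
    (c1 c2 c3 c4 c5 : PySem.Dict String Int) :
    rows.foldl (fun counters row =>
      let counters := counters.insert "source"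
        (add_facet_value (counters.getD "source" (PySem.Dict.mk [])) ((PySem.Dict.mk row).getD "source" none))
      let counters := counters.insert "location"
        (add_facet_value (counters.getD "location" (PySem.Dict.mk [])) ((PySem.Dict.mk row).getD "location" none))
      let counters := counters.insert "work_mode"
        (add_facet_value (counters.getD "work_mode" (PySem.Dict.mk [])) ((PySem.Dict.mk row).getD "work_mode" none))
      let counters := counters.insert "seniority"
        (add_facet_value (counters.getD "seniority" (PySem.Dict.mk [])) ((PySem.Dict.mk row).getD "seniority" none))
      let counters := counters.insert "employment_type"
        (add_facet_value (counters.getD "employment_type" (PySem.Dict.mk [])) ((PySem.Dict.mk row).getD "employment_type" none))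
      counters)
      (PySem.Dict.mk [("source", c1), ("location", c2), ("work_mode", c3), ("seniority", c4), ("employment_type", c5)])
    = PySem.Dict.mk
        [("source", rows.foldl (fun c row => add_facet_value c ((PySem.Dict.mk row).getD "source" none)) c1),
         ("location", rows.foldl (fun c row => add_facet_value c ((PySem.Dict.mk row).getD "location" none)) c2),
         ("work_mode", rows.foldl (fun c row => add_facet_value c ((PySem.Dict.mk row).getD "work_mode" none)) c3),
         ("seniority", rows.foldl (fun c row => add_facet_value c ((PySem.Dict.mk row).getD "seniority" none)) c4),
         ("employment_type", rows.foldl (fun c row => add_facet_value c ((PySem.Dict.mk row).getD "employment_type" none)) c5)] := by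
  induction rows generalizing c1 c2 c3 c4 c5 with
  | nil => rfl
  | cons row rest ih =>
    simp only [List.foldl_cons]
    exact ih _ _ _ _ _

-- B's inlined coercion body matches A's add_facet_value helper
theorem alt_body_eq (c : PySem.Dict String Int) (v : Option String) :
    (match v with
     | none => c
     | some value =>
       let text := PySem.Str.strip value
       if text = "" then c else c.modify (PySem.Str.lower text) 0 (· + 1))
    = add_facet_value c v := by
  cases v with
  | none => rfl
  | some s =>
    simp only [add_facet_value, coerce_text]
    by_cases h : PySem.Str.strip s = "" <;> simp [h]

-- the five facet names in Python's sorted order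
theorem sorted_names :
    PySem.List.sorted ["source", "location", "work_mode", "seniority", "employment_type"] (fun k => k) false
    = ["employment_type", "location", "seniority", "source", "work_mode"] := by
  simp [PySem.List.sorted_eq_foldl_insertBy, PySem.List.insertBy]
  decide

-- ===== VERDICT (by name: the statement is the Claim_ definition above) =====
theorem build_facets_py_spec : Claim_equal_build_facets_py := by
  intro rows _
  unfold Spec_build_facets_py build_facets_py build_facets_py_alt
  simp only [A_fold, alt_body_eq, PySem.Dict.keys_mk, List.map_cons, List.map_nil]
  rw [sorted_names]
  simp [List.foldl_cons, List.foldl_nil, PySem.Dict.getD, PySem.Dict.get?_mk_cons]
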